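-- pv_equiv track=rewrite | github.com/XGCoder/create_clash_yaml | clash_config_generator/node_parser.py | validate_node
-- ===== SOURCE A (Python) =====
-- def validate_node(node):
--     """
--     验证节点信息的完整性和有效性
--
--     Args:
--         node (dict): 节点配置
--
--     Returns:
--         bool: 节点是否有效
--     """
--     if not isinstance(node, dict):
--         return False
--
--     # 检查必要字段
--     required_fields = ['name', 'type', 'server', 'port']
--     if not all(field in node for field in required_fields):
--         return False
--
--     # 根据类型检查特定字段
--     node_type = node['type']
--     if node_type == 'vless' and 'uuid' not in node:
--         return False
--     elif node_type == 'vmess' and ('uuid' not in node or 'alterId' not in node):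
--         return False
--     elif node_type == 'ss' and ('cipher' not in node or 'password' not in node):
--         return False
--     elif node_type == 'trojan' and 'password' not in node:
--         return False
--     elif node_type == 'hysteria' and 'auth_str' not in node:
--         return False
--     elif node_type == 'hysteria2' and 'password' not in node:
--         return False
--
--     return True
-- ===== SOURCE B (Python) =====
-- # Inverted validation: build the set of still-missing required fields (base + per-type extras),
-- # tick keys off in one pass over the node, and succeed iff nothing remains missing.
-- _EXTRA_FIELDS = {
--     'vless': ['uuid'],
--     'vmess': ['uuid', 'alterId'],
--     'ss': ['cipher', 'password'],
--     'trojan': ['password'],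
--     'hysteria': ['auth_str'],
--     'hysteria2': ['password'],
-- }
--
-- def validate_node(node):
--     if not isinstance(node, dict):
--         return False
--     if 'type' not in node:
--         return False
--     missing = {'name', 'type', 'server', 'port'}
--     missing.update(_EXTRA_FIELDS.get(node['type'], []))
--     for key in node:
--         missing.discard(key)
--     return not missing
-- ===== Notes on version B (the rewrite author's own statement) =====
-- stated objective: alternative
-- what changed: Inverts the traversal: instead of A's per-field membership scans driven by a six-branch if/elif chain, B builds one set of all still-missing required fields (base plus per-type extras) and ticks fields off in a single pass over the node's keys, succeeding iff the missing set empties.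
import Mathlib
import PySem

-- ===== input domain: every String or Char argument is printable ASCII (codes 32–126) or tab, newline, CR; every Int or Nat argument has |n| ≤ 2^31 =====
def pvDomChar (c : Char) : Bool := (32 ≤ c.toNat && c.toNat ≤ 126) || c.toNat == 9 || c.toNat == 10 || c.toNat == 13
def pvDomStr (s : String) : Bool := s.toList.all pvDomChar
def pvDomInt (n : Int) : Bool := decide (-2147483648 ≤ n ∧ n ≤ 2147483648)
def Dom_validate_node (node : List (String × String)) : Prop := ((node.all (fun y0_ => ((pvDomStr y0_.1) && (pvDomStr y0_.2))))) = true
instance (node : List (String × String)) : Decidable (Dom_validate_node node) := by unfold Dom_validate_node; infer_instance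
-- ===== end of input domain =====

-- B inverts the traversal: it builds the set of still-missing required fields (base + per-type
-- extras) and ticks fields off in one pass over the node's keys, succeeding iff the set empties
-- (objective: alternative decomposition, same cost).

-- ===== PORT A =====
-- 'f in node' on a dict = key membership; node['type'] = first-match lookup (keys unique in a Python dict)
def validate_node (node : List (String × String)) : Bool :=
  if !(["name", "type", "server", "port"].all (fun f => node.any (fun p => p.1 == f))) then false
  else
    let t := (((node.find? (fun p => p.1 == "type")).map (·.2)).getD "")
    if t == "vless" && !(node.any (fun p => p.1 == "uuid")) then false
    else if t == "vmess" && (!(node.any (fun p => p.1 == "uuid")) || !(node.any (fun p => p.1 == "alterId"))) then false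
    else if t == "ss" && (!(node.any (fun p => p.1 == "cipher")) || !(node.any (fun p => p.1 == "password"))) then false
    else if t == "trojan" && !(node.any (fun p => p.1 == "password")) then false
    else if t == "hysteria" && !(node.any (fun p => p.1 == "auth_str")) then false
    else if t == "hysteria2" && !(node.any (fun p => p.1 == "password")) then false
    else true

-- ===== PORT B =====
-- _EXTRA_FIELDS table; .get with default [] = first-match lookup, [] when absent
def extraFieldsTable : List (String × List String) :=
  [("vless", ["uuid"]), ("vmess", ["uuid", "alterId"]), ("ss", ["cipher", "password"]),
   ("trojan", ["password"]), ("hysteria", ["auth_str"]), ("hysteria2", ["password"])]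

-- missing = {'name','type','server','port'}; missing.update(extras); for key in node: missing.discard(key); return not missing
def validate_node_alt (node : List (String × String)) : Bool :=
  if !(node.any (fun p => p.1 == "type")) then false
  else
    let t := (((node.find? (fun p => p.1 == "type")).map (·.2)).getD "")
    let missing0 : PySem.Set String := PySem.Set.ofList ["name", "type", "server", "port"]
    let missing1 := PySem.Set.update missing0 (((extraFieldsTable.find? (fun p => p.1 == t)).map (·.2)).getD [])
    let missing := node.foldl (fun s p => PySem.Set.discard s p.1) missing1
    missing.isEmpty

-- ===== PRECONDITION & SPEC =====
def Spec_validate_node (node : List (String × String)) (out : Bool) : Prop := out = validate_node_alt node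
instance (node : List (String × String)) (out : Bool) : Decidable (Spec_validate_node node out) := by unfold Spec_validate_node; infer_instance

-- ===== CLAIM (what is proved, stated in full; the proofs are below) =====
def Claim_equal_validate_node : Prop := ∀ (node : List (String × String)), Dom_validate_node node → Spec_validate_node node (validate_node node)

-- ===== LEMMAS AND PROOFS =====

-- ticking keys off one by one = keeping exactly the fields no node key matches
theorem foldl_discard_eq_filter (l : List (String × String)) (s : List String) :
    l.foldl (fun s p => PySem.Set.discard s p.1) s
      = s.filter (fun x => !(l.any (fun p => p.1 == x))) := by
  induction l generalizing s with
  | nil => simp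
  | cons p l ih =>
    simp only [List.foldl_cons]
    rw [ih]
    simp only [PySem.Set.discard, List.filter_filter]
    refine List.filter_congr (fun x _ => ?_)
    rw [BEq.comm]
    simp [Bool.and_comm]

-- the missing set empties iff every field it started with occurs among the node's keys
theorem foldl_discard_isEmpty (l : List (String × String)) (s : List String) :
    (l.foldl (fun s p => PySem.Set.discard s p.1) s).isEmpty
      = s.all (fun x => l.any (fun p => p.1 == x)) := by
  rw [foldl_discard_eq_filter, Bool.eq_iff_iff]
  simp [List.isEmpty_iff, List.filter_eq_nil_iff, List.all_eq_true]

-- set.update only appends new elements at the end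
theorem update_append {α : Type} [BEq α] (l : List α) (s : PySem.Set α) :
    ∃ r, PySem.Set.update s l = s ++ r := by
  induction l generalizing s with
  | nil => exact ⟨[], by simp [PySem.Set.update]⟩
  | cons x l ih =>
    simp only [PySem.Set.update, List.foldl_cons] at *
    unfold PySem.Set.add
    split
    · exact ih s
    · obtain ⟨r, hr⟩ := ih (s ++ [x])
      exact ⟨[x] ++ r, by simpa using hr⟩

-- ===== VERDICT (by name: the statement is the Claim_ definition above) =====
theorem validate_node_spec : Claim_equal_validate_node := by
  intro node _
  unfold Spec_validate_node validate_node validate_node_alt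
  simp only [foldl_discard_isEmpty]
  by_cases hb : (["name", "type", "server", "port"].all (fun f => node.any (fun p => p.1 == f))) = true
  · have hb' := hb
    simp only [List.all_cons, List.all_nil, Bool.and_true, Bool.and_eq_true] at hb'
    obtain ⟨hn, ht, hs, hp⟩ := hb'
    simp only [hb, ht, Bool.not_true, if_neg Bool.false_ne_true]
    generalize (((node.find? (fun p => p.1 == "type")).map (·.2)).getD "") = t
    by_cases h1 : t = "vless"
    · subst h1; simp [extraFieldsTable, PySem.Set.update, PySem.Set.ofList, PySem.Set.add, hn, ht, hs, hp]
    by_cases h2 : t = "vmess"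
    · subst h2; simp [extraFieldsTable, PySem.Set.update, PySem.Set.ofList, PySem.Set.add, hn, ht, hs, hp]
    by_cases h3 : t = "ss"
    · subst h3; simp [extraFieldsTable, PySem.Set.update, PySem.Set.ofList, PySem.Set.add, hn, ht, hs, hp]
    by_cases h4 : t = "trojan"
    · subst h4; simp [extraFieldsTable, PySem.Set.update, PySem.Set.ofList, PySem.Set.add, hn, ht, hs, hp]
    by_cases h5 : t = "hysteria"
    · subst h5; simp [extraFieldsTable, PySem.Set.update, PySem.Set.ofList, PySem.Set.add, hn, ht, hs, hp]
    by_cases h6 : t = "hysteria2"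
    · subst h6; simp [extraFieldsTable, PySem.Set.update, PySem.Set.ofList, PySem.Set.add, hn, ht, hs, hp]
    · have e1 : ("vless" == t) = false := beq_eq_false_iff_ne.mpr (fun h => h1 h.symm)
      have e2 : ("vmess" == t) = false := beq_eq_false_iff_ne.mpr (fun h => h2 h.symm)
      have e3 : ("ss" == t) = false := beq_eq_false_iff_ne.mpr (fun h => h3 h.symm)
      have e4 : ("trojan" == t) = false := beq_eq_false_iff_ne.mpr (fun h => h4 h.symm)
      have e5 : ("hysteria" == t) = false := beq_eq_false_iff_ne.mpr (fun h => h5 h.symm)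
      have e6 : ("hysteria2" == t) = false := beq_eq_false_iff_ne.mpr (fun h => h6 h.symm)
      have f1 : (t == "vless") = false := beq_eq_false_iff_ne.mpr h1
      have f2 : (t == "vmess") = false := beq_eq_false_iff_ne.mpr h2
      have f3 : (t == "ss") = false := beq_eq_false_iff_ne.mpr h3
      have f4 : (t == "trojan") = false := beq_eq_false_iff_ne.mpr h4
      have f5 : (t == "hysteria") = false := beq_eq_false_iff_ne.mpr h5
      have f6 : (t == "hysteria2") = false := beq_eq_false_iff_ne.mpr h6
      simp [extraFieldsTable, PySem.Set.update, PySem.Set.ofList, PySem.Set.add,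
        hn, ht, hs, hp, e1, e2, e3, e4, e5, e6, f1, f2, f3, f4, f5, f6]
  · simp only [hb, Bool.not_false]
    by_cases ht : (node.any (fun p => p.1 == "type")) = true
    · simp only [ht, Bool.not_true, if_neg Bool.false_ne_true]
      obtain ⟨r, hr⟩ := update_append
        (((extraFieldsTable.find? (fun p => p.1 ==
            (((node.find? (fun p => p.1 == "type")).map (·.2)).getD ""))).map (·.2)).getD [])
        (PySem.Set.ofList ["name", "type", "server", "port"])
      rw [hr]
      have hof : PySem.Set.ofList ["name", "type", "server", "port"]
          = ["name", "type", "server", "port"] := by decide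
      rw [hof, List.all_append, if_pos trivial, eq_comm, Bool.and_eq_false_iff]
      left
      exact Bool.eq_false_iff.mpr (fun h => hb h)
    · simp [ht]
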